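-- pv_equiv track=rewrite | github.com/adrpar/architecture-diagrams | arch_diagrams/adapter/pystructurizr_export.py | _reorder_relationships_after_declarations
-- ===== SOURCE A (Python) =====
-- def _reorder_relationships_after_declarations(dsl: str) -> str:
--     """Move all relationship lines ("a -> b ...") to the end of the model block.
--
--     Some Structurizr DSL parsers require variables to be declared before they
--     are referenced in relationships. Reordering ensures declarations precede uses.
--     """
--     lines = dsl.splitlines()
--     # Find the model { ... } block range
--     model_start = None
--     model_end = None
--     depth = 0
--     for i, line in enumerate(lines):
--         if line.strip() == 'model {':
--             model_start = i
--             depth = 1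
--             for j in range(i + 1, len(lines)):
--                 depth += lines[j].count('{') - lines[j].count('}')
--                 if depth == 0:
--                     model_end = j
--                     break
--             break
--     if model_start is None or model_end is None:
--         return dsl
--     # Collect relationship lines and remove them from their positions
--     rel_lines: list[str] = []
--     kept: list[str] = []
--     for idx in range(model_start + 1, model_end):
--         line = lines[idx]
--         if '->' in line and '"' in line:
--             rel_lines.append(line)
--         else:
--             kept.append(line)
--     # Rebuild: model { + kept + rel_lines + closing
--     new_lines = []
--     new_lines.extend(lines[:model_start + 1])
--     new_lines.extend(kept)
--     if rel_lines:
--         # Ensure a blank separator for readability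
--         if kept and kept[-1].strip() != '':
--             new_lines.append('')
--         new_lines.extend(rel_lines)
--     new_lines.extend(lines[model_end:])
--     return '\n'.join(new_lines)
-- ===== SOURCE B (Python) =====
-- def _reorder_relationships_after_declarations(dsl: str) -> str:
--     """Single linear pass with an explicit in-model state flag."""
--     lines = dsl.splitlines()
--     out: list[str] = []
--     kept: list[str] = []
--     rel_lines: list[str] = []
--     in_model = False
--     depth = 0
--     for pos, line in enumerate(lines):
--         if not in_model:
--             out.append(line)
--             if line.strip() == 'model {':
--                 in_model = True
--                 depth = 1
--         else:
--             depth += line.count('{') - line.count('}')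
--             if depth == 0:
--                 # close of the model block: flush kept, separator, relationships
--                 out.extend(kept)
--                 if rel_lines:
--                     if kept and kept[-1].strip() != '':
--                         out.append('')
--                     out.extend(rel_lines)
--                 out.extend(lines[pos:])
--                 return '\n'.join(out)
--             if '->' in line and '"' in line:
--                 rel_lines.append(line)
--             else:
--                 kept.append(line)
--     return dsl
-- ===== Notes on version B (the rewrite author's own statement) =====
-- stated objective: alternative
-- what changed: A locates the model block with a nested find-then-scan, then partitions the block in a second pass and rebuilds by slicing; B is a single linear pass over the lines with an explicit in-model state flag that routes lines as it goes and flushes kept/separator/relationships at block close, returning the input verbatim if no block completes.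
import Mathlib
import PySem

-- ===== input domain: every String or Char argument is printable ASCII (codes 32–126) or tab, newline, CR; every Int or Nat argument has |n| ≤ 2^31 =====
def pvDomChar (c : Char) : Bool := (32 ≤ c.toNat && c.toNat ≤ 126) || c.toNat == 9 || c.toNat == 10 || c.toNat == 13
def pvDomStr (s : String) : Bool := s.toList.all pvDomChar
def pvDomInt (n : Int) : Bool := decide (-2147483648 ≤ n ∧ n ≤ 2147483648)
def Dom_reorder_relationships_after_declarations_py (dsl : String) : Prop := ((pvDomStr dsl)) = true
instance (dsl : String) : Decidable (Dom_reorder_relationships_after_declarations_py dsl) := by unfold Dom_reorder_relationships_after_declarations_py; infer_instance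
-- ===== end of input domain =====

-- B replaces A's find-then-partition-then-rebuild phases by a single linear pass with an
-- explicit in-model state flag (objective: alternative decomposition, same cost).

-- ===== PORT A =====
-- is this a relationship line: '->' in line and '"' in line
def pvIsRel (l : String) : Bool := PySem.Str.isIn "->" l && PySem.Str.isIn "\"" l

-- A's inner loop: for j in range(i+1, len(lines)): depth += …; if depth == 0: model_end = j; break
def pvAClose (lines : List String) (j : Nat) (depth : Int) : Option Nat :=
  if h : j < lines.length then
    let d := depth + (PySem.Str.count lines[j] "{" : Int) - (PySem.Str.count lines[j] "}" : Int)
    if d = 0 then some j else pvAClose lines (j + 1) d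
  else none
termination_by lines.length - j

-- A's collection loop: for idx in range(model_start+1, model_end): route into rel_lines / kept
def pvACollect (lines : List String) (idx me : Nat) (rel kept : List String) :
    List String × List String :=
  if idx < me then
    let line := lines.getD idx ""
    if pvIsRel line then pvACollect lines (idx + 1) me (rel ++ [line]) kept
    else pvACollect lines (idx + 1) me rel (kept ++ [line])
  else (rel, kept)
termination_by me - idx

def reorder_relationships_after_declarations_py (dsl : String) : String :=
  let lines := PySem.Str.splitlines dsl
  -- outer loop: first i with lines[i].strip() == 'model {' (breaks after the first hit)
  match lines.findIdx? (fun l => PySem.Str.strip l == "model {") with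
  | none => dsl
  | some ms =>
    match pvAClose lines (ms + 1) 1 with
    | none => dsl
    | some me =>
      let rk := pvACollect lines (ms + 1) me [] []
      let rel := rk.1
      let kept := rk.2
      -- new_lines = lines[:ms+1] + kept + (sep + rel if rel) + lines[me:]
      let new_lines := lines.take (ms + 1) ++ kept ++
        (if rel ≠ [] then
          (if kept ≠ [] ∧ PySem.Str.strip (kept.getLastD "") ≠ "" then [""] else []) ++ rel
         else []) ++ lines.drop me
      PySem.Str.join "\n" new_lines

-- ===== PORT B =====
-- in-model phase: depth bookkeeping, routing, and the flush at block close; none = block never closes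
def pvBInner : List String → Int → List String → List String → Option (List String)
  | [], _, _, _ => none
  | l :: rs, depth, kept, rel =>
    let d := depth + (PySem.Str.count l "{" : Int) - (PySem.Str.count l "}" : Int)
    if d = 0 then
      some (kept ++
        (if rel ≠ [] then
          (if kept ≠ [] ∧ PySem.Str.strip (kept.getLastD "") ≠ "" then [""] else []) ++ rel
         else []) ++ (l :: rs))
    else if pvIsRel l then pvBInner rs d kept (rel ++ [l])
    else pvBInner rs d (kept ++ [l]) rel

-- pre-model phase: copy lines verbatim until the first 'model {' line, then switch state
def pvBOuter : List String → Option (List String)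
  | [] => none
  | l :: rs =>
    if PySem.Str.strip l == "model {" then (pvBInner rs 1 [] []).map (l :: ·)
    else (pvBOuter rs).map (l :: ·)

def reorder_relationships_after_declarations_py_alt (dsl : String) : String :=
  match pvBOuter (PySem.Str.splitlines dsl) with
  | none => dsl
  | some new_lines => PySem.Str.join "\n" new_lines

-- ===== PRECONDITION & SPEC =====
def Spec_reorder_relationships_after_declarations_py (dsl : String) (out : String) : Prop := out = reorder_relationships_after_declarations_py_alt dsl
instance (dsl : String) (out : String) : Decidable (Spec_reorder_relationships_after_declarations_py dsl out) := by unfold Spec_reorder_relationships_after_declarations_py; infer_instance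

-- ===== CLAIM (what is proved, stated in full; the proofs are below) =====
def Claim_equal_reorder_relationships_after_declarations_py : Prop := ∀ (dsl : String), Dom_reorder_relationships_after_declarations_py dsl → Spec_reorder_relationships_after_declarations_py dsl (reorder_relationships_after_declarations_py dsl)

-- ===== LEMMAS AND PROOFS =====

-- proof-only helper: offset of the line closing the block, scanning a suffix
def pvScan : List String → Int → Option Nat
  | [], _ => none
  | l :: rs, d =>
    let d' := d + (PySem.Str.count l "{" : Int) - (PySem.Str.count l "}" : Int)
    if d' = 0 then some 0 else (pvScan rs d').map (· + 1)

theorem pvScan_lt {rest : List String} {d : Int} {k : Nat}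
    (h : pvScan rest d = some k) : k < rest.length := by
  induction rest generalizing d k with
  | nil => simp [pvScan] at h
  | cons l rs ih =>
    simp only [pvScan] at h
    split at h
    · cases h; simp
    · rcases Option.map_eq_some_iff.mp h with ⟨k', hk', rfl⟩
      have := ih hk'
      simp; omega

theorem pvAClose_eq (lines : List String) (j : Nat) (d : Int) :
    pvAClose lines j d = (pvScan (lines.drop j) d).map (fun k => j + k) := by
  by_cases h : j < lines.length
  · rw [pvAClose, dif_pos h, List.drop_eq_getElem_cons h]
    simp only [pvScan]
    split
    · simp
    · rw [pvAClose_eq lines (j + 1) _]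
      cases pvScan (lines.drop (j + 1)) _ with
      | none => simp
      | some k => simp; omega
  · rw [pvAClose, dif_neg h, List.drop_eq_nil_of_le (by omega)]
    simp [pvScan]
termination_by lines.length - j

theorem pvACollect_eq (n : Nat) (lines : List String) (idx me : Nat) (rel kept : List String)
    (hn : me - idx = n) (hme : me ≤ lines.length) :
    pvACollect lines idx me rel kept =
      (rel ++ ((lines.drop idx).take (me - idx)).filter pvIsRel,
       kept ++ ((lines.drop idx).take (me - idx)).filter (fun l => !pvIsRel l)) := by
  induction n generalizing idx rel kept with
  | zero =>
    rw [pvACollect, if_neg (by omega)]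
    simp [hn]
  | succ m ih =>
    have hidx : idx < me := by omega
    have hlt : idx < lines.length := by omega
    rw [pvACollect, if_pos hidx]
    have hget : lines.getD idx "" = lines[idx] := by
      simp [List.getD, List.getElem?_eq_getElem hlt]
    have hdrop : lines.drop idx = lines[idx] :: lines.drop (idx + 1) :=
      List.drop_eq_getElem_cons hlt
    have htake : (lines.drop idx).take (me - idx)
        = lines[idx] :: (lines.drop (idx + 1)).take (me - (idx + 1)) := by
      rw [hdrop]
      have : me - idx = (me - (idx + 1)) + 1 := by omega
      rw [this, List.take_succ_cons]
    rw [htake]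
    simp only [hget, List.filter_cons]
    by_cases hp : pvIsRel lines[idx]
    · rw [if_pos hp, ih (idx + 1) (rel ++ [lines[idx]]) kept (by omega)]
      simp [hp]
    · rw [if_neg hp, ih (idx + 1) rel (kept ++ [lines[idx]]) (by omega)]
      simp [hp]

theorem pvBInner_eq (rest : List String) (d : Int) (kept rel : List String) :
    pvBInner rest d kept rel = (pvScan rest d).map (fun k =>
      let K := kept ++ (rest.take k).filter (fun l => !pvIsRel l)
      let R := rel ++ (rest.take k).filter pvIsRel
      K ++ (if R ≠ [] then
              (if K ≠ [] ∧ PySem.Str.strip (K.getLastD "") ≠ "" then [""] else []) ++ R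
            else []) ++ rest.drop k) := by
  induction rest generalizing d kept rel with
  | nil => simp [pvBInner, pvScan]
  | cons l rs ih =>
    simp only [pvBInner, pvScan]
    split
    · simp
    · by_cases hp : pvIsRel l = true
      · rw [if_pos hp, ih]
        cases h : pvScan rs _ with
        | none => simp
        | some k =>
          simp only [Option.map_some, Option.some.injEq]
          simp only [List.take_succ_cons, List.drop_succ_cons, List.filter_cons, hp,
            Bool.not_true, if_pos, if_neg, Bool.false_eq_true, not_false_eq_true]
          have e : rel ++ l :: (rs.take k).filter pvIsRel
              = (rel ++ [l]) ++ (rs.take k).filter pvIsRel := by simp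
          rw [e]
      · rw [if_neg hp, ih]
        cases h : pvScan rs _ with
        | none => simp
        | some k =>
          simp only [Option.map_some, Option.some.injEq]
          simp only [List.take_succ_cons, List.drop_succ_cons, List.filter_cons, hp,
            Bool.not_false, Bool.false_eq_true, ite_true, ite_false]
          have e : kept ++ l :: (rs.take k).filter (fun l => !pvIsRel l)
              = (kept ++ [l]) ++ (rs.take k).filter (fun l => !pvIsRel l) := by simp
          rw [e]

theorem pvBOuter_eq (lines : List String) :
    pvBOuter lines = match lines.findIdx? (fun l => PySem.Str.strip l == "model {") with
      | none => none
      | some i => (pvBInner (lines.drop (i + 1)) 1 [] []).map (fun t => lines.take (i + 1) ++ t) := by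
  induction lines with
  | nil => simp [pvBOuter]
  | cons l rs ih =>
    rw [pvBOuter, List.findIdx?_cons]
    by_cases hq : (PySem.Str.strip l == "model {") = true
    · simp [hq]
    · rw [if_neg hq, if_neg hq, ih]
      cases h : rs.findIdx? (fun l => PySem.Str.strip l == "model {") with
      | none => simp
      | some i =>
        simp only [Option.map_some]
        cases hb : pvBInner (rs.drop i.succ) 1 [] [] with
        | none => simp [Nat.succ_eq_add_one] at hb ⊢; simp [hb]
        | some t =>
          simp [Nat.succ_eq_add_one] at hb ⊢
          simp [hb]

-- ===== VERDICT (by name: the statement is the Claim_ definition above) =====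
theorem reorder_relationships_after_declarations_py_spec : Claim_equal_reorder_relationships_after_declarations_py := by
  intro dsl _
  unfold Spec_reorder_relationships_after_declarations_py
  unfold reorder_relationships_after_declarations_py reorder_relationships_after_declarations_py_alt
  rw [pvBOuter_eq]
  cases hf : (PySem.Str.splitlines dsl).findIdx? (fun l => PySem.Str.strip l == "model {") with
  | none => simp [hf]
  | some ms =>
    simp only [hf]
    rw [pvAClose_eq, pvBInner_eq]
    cases hs : pvScan ((PySem.Str.splitlines dsl).drop (ms + 1)) 1 with
    | none => simp
    | some k =>
      have hk := pvScan_lt hs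
      have hme : ms + 1 + k ≤ (PySem.Str.splitlines dsl).length := by
        have := List.length_drop (l := PySem.Str.splitlines dsl) (i := ms + 1)
        omega
      simp only [Option.map_some]
      rw [pvACollect_eq ((ms + 1 + k) - (ms + 1)) _ (ms + 1) (ms + 1 + k) [] [] rfl hme]
      have hdd : (PySem.Str.splitlines dsl).drop (ms + 1 + k)
          = ((PySem.Str.splitlines dsl).drop (ms + 1)).drop k := by
        rw [List.drop_drop]
      have hmk : ms + 1 + k - (ms + 1) = k := by omega
      simp only [hmk, hdd, List.nil_append]
      simp [List.append_assoc]
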